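-- pv_equiv track=rewrite | github.com/prissilya/Repo1 | Latihan Python/20200517_PrissilyaZefanya.py | pilih_seat
-- ===== SOURCE A (Python) =====
-- def pilih_seat(a_seat,no_seat):
--     isi = False
--     z=''
--     for i in range (1,a_seat+1):
--         for j in range (len(no_seat)):
--             if no_seat[j]==i:
--                 isi = True
--                 break
--             else:
--                 isi = False
--         if isi == True:
--             z+=' X '
--         else:
--             z+=' 0 '
--     return z
-- ===== SOURCE B (Python) =====
-- def pilih_seat(a_seat, no_seat):
--     booked = sorted({x for x in no_seat if 1 <= x <= a_seat})
--     pieces = []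
--     prev = 0
--     for x in booked:
--         pieces.append(' 0 ' * (x - 1 - prev))
--         pieces.append(' X ')
--         prev = x
--     pieces.append(' 0 ' * (a_seat - prev))
--     return ''.join(pieces)
-- ===== Notes on version B (the rewrite author's own statement) =====
-- stated objective: faster
-- what changed: Replaces A's per-seat linear scan of no_seat by sorting the distinct in-range booked seats once and emitting the answer as free-run gaps between consecutive booked seats (run-length construction), with no per-seat membership test at all.
import Mathlib
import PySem

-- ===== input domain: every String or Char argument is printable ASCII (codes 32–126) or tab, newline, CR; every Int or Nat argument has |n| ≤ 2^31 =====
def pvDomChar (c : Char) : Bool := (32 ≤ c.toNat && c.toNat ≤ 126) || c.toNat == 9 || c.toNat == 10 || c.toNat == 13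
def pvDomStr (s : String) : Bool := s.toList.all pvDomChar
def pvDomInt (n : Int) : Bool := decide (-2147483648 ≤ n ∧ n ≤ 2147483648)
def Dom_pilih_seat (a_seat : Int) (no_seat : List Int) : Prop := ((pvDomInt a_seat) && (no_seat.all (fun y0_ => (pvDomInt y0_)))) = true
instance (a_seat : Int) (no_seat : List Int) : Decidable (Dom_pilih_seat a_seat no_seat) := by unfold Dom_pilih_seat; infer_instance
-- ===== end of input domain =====

-- B sorts the distinct in-range booked seats once and emits the row as free-run gaps
-- between consecutive booked seats, instead of testing each seat against no_seat (faster).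

-- ===== PORT A =====
-- inner 'for j in range(len(no_seat))' loop with break; the flag 'isi' is threaded in
-- (it keeps its previous value when no_seat is empty, exactly as in the Python)
def pvInnerA (isi : Bool) (i : Int) : List Int → Bool
  | [] => isi
  | x :: rest => if x == i then true else pvInnerA false i rest

-- one iteration of the outer 'for i in range(1, a_seat+1)' loop: state = (isi, z)
def pvStepA (ns : List Int) (st : Bool × String) (i : Int) : Bool × String :=
  let isi := pvInnerA st.1 i ns
  (isi, st.2 ++ (if isi then " X " else " 0 "))

def pilih_seat (a_seat : Int) (no_seat : List Int) : String :=
  ((PySem.List.pyRange 1 (a_seat + 1)).foldl (pvStepA no_seat) (false, "")).2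

-- ===== PORT B =====
-- one iteration of B's 'for x in booked' loop: state = (prev, pieces);
-- ' 0 ' * n is PySem.List.pyRepeat on the code points
def pvStepB (st : Int × List String) (x : Int) : Int × List String :=
  (x, st.2 ++ [String.ofList (PySem.List.pyRepeat [' ', '0', ' '] (x - 1 - st.1)), " X "])

def pilih_seat_alt (a_seat : Int) (no_seat : List Int) : String :=
  let booked := PySem.List.sorted
    (PySem.Set.ofList (no_seat.filter (fun x => decide (1 ≤ x) && decide (x ≤ a_seat))))
    (fun x => x) false
  let st := booked.foldl pvStepB ((0 : Int), ([] : List String))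
  PySem.Str.join "" (st.2 ++ [String.ofList (PySem.List.pyRepeat [' ', '0', ' '] (a_seat - st.1))])

-- ===== PRECONDITION & SPEC =====
def Spec_pilih_seat (a_seat : Int) (no_seat : List Int) (out : String) : Prop := out = pilih_seat_alt a_seat no_seat
instance (a_seat : Int) (no_seat : List Int) (out : String) : Decidable (Spec_pilih_seat a_seat no_seat out) := by unfold Spec_pilih_seat; infer_instance

-- ===== CLAIM (what is proved, stated in full; the proofs are below) =====
def Claim_equal_pilih_seat : Prop := ∀ (a_seat : Int) (no_seat : List Int), Dom_pilih_seat a_seat no_seat → Spec_pilih_seat a_seat no_seat (pilih_seat a_seat no_seat)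

-- ===== LEMMAS AND PROOFS =====

-- the inner loop starting with flag false computes membership
theorem pvInnerA_false (i : Int) (ns : List Int) : pvInnerA false i ns = ns.contains i := by
  induction ns with
  | nil => rfl
  | cons x rest ih =>
    show (if x == i then true else pvInnerA false i rest) = _
    by_cases h : x = i
    · simp [h]
    · simp only [ih]
      simp only [List.contains_cons]
      have hxi : ((i == x) = false) := by simp [Ne.symm h]
      simp only [hxi, Bool.false_or]
      simp [h]

theorem pvInnerA_ne_nil (b : Bool) (i : Int) (ns : List Int) (h : ns ≠ []) :
    pvInnerA b i ns = ns.contains i := by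
  cases ns with
  | nil => exact absurd rfl h
  | cons x rest =>
    show (if x == i then true else pvInnerA false i rest) = _
    rw [← pvInnerA_false i (x :: rest)]
    rfl

-- A's outer fold accumulates one marker string per seat number
theorem foldA (ns : List Int) (l : List Int) :
    ∀ (z : String) (b : Bool), (b = false ∨ ns ≠ []) →
    ((l.foldl (pvStepA ns) (b, z)).2).toList =
    z.toList ++ ((l.map (fun i => if ns.contains i then " X " else " 0 ")).map String.toList).flatten := by
  induction l with
  | nil => intro z b _; simp
  | cons i rest ih =>
    intro z b hb
    have hflag : pvInnerA b i ns = ns.contains i := by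
      rcases hb with hb | hb
      · subst hb; exact pvInnerA_false i ns
      · exact pvInnerA_ne_nil b i ns hb
    have hnext : (ns.contains i) = false ∨ ns ≠ [] := by
      cases ns with
      | nil => left; simp
      | cons _ _ => right; simp
    simp only [List.foldl_cons, pvStepA, hflag]
    rw [ih (z ++ (if ns.contains i then " X " else " 0 ")) (ns.contains i) hnext]
    by_cases h : ns.contains i <;> simp

-- range(s, s+n) lists s + k for k in range(n)
theorem pyRange_shift (s : Int) (n : Nat) :
    PySem.List.pyRange s (s + n) = (List.range n).map (fun (k : Nat) => s + k) := by
  induction n generalizing s with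
  | zero => simp [PySem.List.pyRange_one_eq_nil]
  | succ m ih =>
    have hlt : s < s + ((m : Int) + 1) := by omega
    have hcast : (((m + 1 : Nat)) : Int) = (m : Int) + 1 := by push_cast; ring
    rw [hcast, PySem.List.pyRange_one_cons hlt]
    have hb : s + ((m : Int) + 1) = (s + 1) + (m : Int) := by ring
    rw [hb, ih (s + 1), List.range_succ_eq_map]
    simp only [List.map_cons, List.map_map]
    congr 1
    · omega
    · apply List.map_congr_left
      intro k _
      simp only [Function.comp_apply, Nat.succ_eq_add_one]
      push_cast
      ring

theorem pyRange_one_succ' (a : Int) :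
    PySem.List.pyRange 1 (a + 1) = (List.range a.toNat).map (fun (k : Nat) => (k : Int) + 1) := by
  by_cases ha : 0 ≤ a
  · have h1 : a + 1 = 1 + ((a.toNat : Int)) := by omega
    rw [h1, pyRange_shift 1 a.toNat]
    apply List.map_congr_left
    intro k _
    ring
  · have h1 : a + 1 ≤ 1 := by omega
    have h2 : a.toNat = 0 := by omega
    rw [PySem.List.pyRange_one_eq_nil h1, h2]
    simp

-- char-level twin of B's loop body
def pvStepC (st : Int × List (List Char)) (x : Int) : Int × List (List Char) :=
  (x, st.2 ++ [PySem.List.pyRepeat [' ', '0', ' '] (x - 1 - st.1), [' ', 'X', ' ']])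

-- B's String fold and its char-level twin run in lockstep
theorem foldB_toList (s : List Int) : ∀ (p : Int) (acc : List String),
    s.foldl pvStepC (p, acc.map String.toList) =
    ((s.foldl pvStepB (p, acc)).1, (s.foldl pvStepB (p, acc)).2.map String.toList) := by
  induction s with
  | nil => intro p acc; rfl
  | cons x rest ih =>
    intro p acc
    simp only [List.foldl_cons, pvStepB, pvStepC]
    rw [← ih x (acc ++ [String.ofList (PySem.List.pyRepeat [' ', '0', ' '] (x - 1 - p)), " X "])]
    simp

-- joining with the empty separator is concatenation
theorem intercalate_nil_flatten {α : Type} (ps : List (List α)) :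
    ([] : List α).intercalate ps = ps.flatten := by
  induction ps with
  | nil => simp [List.intercalate]
  | cons p rest ih =>
    have h : ([] : List α).intercalate (p :: rest) = p ++ ([] : List α).intercalate rest := by
      simp [List.intercalate]; cases rest <;> simp [List.intersperse]
    rw [h, ih, List.flatten_cons]

-- the gap construction over a strictly increasing list of booked seats
-- equals the per-seat markers for seats p+1 .. a
theorem pvGap (s : List Int) : ∀ (p a : Int) (acc : List (List Char)),
    s.Pairwise (· < ·) → (∀ x ∈ s, p < x ∧ x ≤ a) →
    ((s.foldl pvStepC (p, acc)).2 ++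
      [PySem.List.pyRepeat [' ', '0', ' '] (a - (s.foldl pvStepC (p, acc)).1)]).flatten =
    acc.flatten ++ ((List.range (a - p).toNat).map
      (fun (k : Nat) => if s.contains (p + 1 + (k : Int)) then [' ', 'X', ' '] else [' ', '0', ' '])).flatten := by
  induction s with
  | nil =>
    intro p a acc _ _
    simp only [List.foldl_nil, List.contains_nil, Bool.false_eq_true, if_false, List.map_const']
    simp [PySem.List.pyRepeat]
  | cons x rest ih =>
    intro p a acc hpw hb
    obtain ⟨hgt, hrest⟩ := List.pairwise_cons.mp hpw
    have hpx : p < x := (hb x (by simp)).1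
    have hxa : x ≤ a := (hb x (by simp)).2
    simp only [List.foldl_cons, pvStepC]
    rw [ih x a _ hrest (fun y hy => ⟨hgt y hy, (hb y (by simp [hy])).2⟩)]
    -- split the seat range p+1..a at the first booked seat x
    have hsplit : (a - p).toNat = (x - 1 - p).toNat + (1 + (a - x).toNat) := by omega
    rw [hsplit, List.range_add, List.range_add]
    simp only [List.map_append, List.map_map, List.flatten_append, List.append_assoc,
      List.flatten_cons, List.map_cons, List.range_one, List.map_nil, List.flatten_nil]
    -- first chunk: seats before x are all free
    have hchunk1 : ((List.range (x - 1 - p).toNat).map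
        (fun (k : Nat) => if (x :: rest).contains (p + 1 + (k : Int)) then [' ', 'X', ' '] else [' ', '0', ' '])) =
        List.replicate (x - 1 - p).toNat [' ', '0', ' '] := by
      rw [show List.replicate (x - 1 - p).toNat [' ', '0', ' '] =
          (List.range (x - 1 - p).toNat).map (fun (_ : Nat) => [' ', '0', ' ']) by
        simp [List.map_const']]
      apply List.map_congr_left
      intro k hk
      have hklt : k < (x - 1 - p).toNat := List.mem_range.mp hk
      have hne : (p + 1 + (k : Int)) ∉ (x :: rest) := by
        intro hmem
        rcases List.mem_cons.mp hmem with h | h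
        · omega
        · have := hgt _ h; omega
      simp [List.contains_eq_mem, hne]
    congr 1
    congr 1
    · rw [hchunk1]
      simp [PySem.List.pyRepeat]
    congr 1
    · -- middle: seat x itself is booked
      have hx : p + 1 + ((((x - 1 - p).toNat + 0 : Nat)) : Int) = x := by
        push_cast; omega
      rw [hx]
      simp [List.contains_eq_mem]
    · -- tail: seats after x; membership drops the head x
      refine congrArg List.flatten ?_
      apply List.map_congr_left
      intro k _
      simp only [Function.comp_apply]
      have hc : p + 1 + ((((x - 1 - p).toNat + (1 + k) : Nat)) : Int) = x + 1 + k := by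
        push_cast; omega
      simp only [hc]
      have hne : ¬ (x + 1 + (k : Int) = x) := by omega
      simp [List.contains_eq_mem, hne]

-- ===== VERDICT (by name: the statement is the Claim_ definition above) =====
theorem pilih_seat_spec : Claim_equal_pilih_seat := by
  intro a ns _
  unfold Spec_pilih_seat
  apply String.toList_inj.mp
  unfold pilih_seat
  rw [foldA ns _ "" false (Or.inl rfl), pyRange_one_succ' a]
  unfold pilih_seat_alt
  simp only
  set booked := PySem.List.sorted
    (PySem.Set.ofList (ns.filter (fun x => decide (1 ≤ x) && decide (x ≤ a))))
    (fun x => x) false with hbooked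
  have hmem : ∀ i : Int, i ∈ booked ↔ (i ∈ ns ∧ 1 ≤ i ∧ i ≤ a) := by
    intro i
    rw [hbooked, PySem.List.mem_sorted, PySem.Set.mem_ofList, List.mem_filter]
    simp
  have hpw : booked.Pairwise (· < ·) := PySem.List.sorted_ofList_pairwise_lt _
  have hbnd : ∀ x ∈ booked, (0 : Int) < x ∧ x ≤ a := by
    intro x hx
    have := (hmem x).mp hx
    omega
  have hfb := foldB_toList booked 0 []
  simp only [List.map_nil] at hfb
  have h1 : (booked.foldl pvStepC (0, [])).1 = (booked.foldl pvStepB (0, [])).1 :=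
    congrArg Prod.fst hfb
  have h2 : (booked.foldl pvStepC (0, [])).2 =
      (booked.foldl pvStepB (0, [])).2.map String.toList := congrArg Prod.snd hfb
  rw [PySem.Str.toList_join, List.map_append, ← h2, ← h1]
  simp only [List.map_cons, List.map_nil, String.toList_ofList]
  simp only [PySem.Chars.join]
  rw [show "".toList = ([] : List Char) from rfl, intercalate_nil_flatten, List.flatten_append]
  have hgap := pvGap booked 0 a ([] : List (List Char)) hpw hbnd
  rw [List.flatten_append] at hgap
  simp only [List.flatten_nil, List.nil_append] at hgap
  rw [hgap]
  simp only [List.nil_append, List.map_map]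
  have hsub : a - 0 = a := by ring
  rw [hsub]
  congr 1
  apply List.map_congr_left
  intro k hk
  have hklt : k < a.toNat := List.mem_range.mp hk
  have hseat : (0 : Int) + 1 + (k : Int) = (k : Int) + 1 := by ring
  rw [hseat]
  have hm : booked.contains ((k : Int) + 1) = ns.contains ((k : Int) + 1) := by
    by_cases h : ((k : Int) + 1) ∈ ns
    · have : ((k : Int) + 1) ∈ booked := (hmem _).mpr ⟨h, by omega, by omega⟩
      simp [h, this]
    · have : ((k : Int) + 1) ∉ booked := fun hc => h ((hmem _).mp hc).1
      simp [h, this]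
  rw [hm]
  by_cases h : ((k : Int) + 1) ∈ ns <;> simp [h, List.contains_eq_mem]
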